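-- pv_equiv track=rewrite | github.com/mauro-nievoff/MultiCaRe_Dataset | multiversity_library/multiversity/multiversity/multiplex_classification.py | _add_compound_classes
-- ===== SOURCE A (Python) =====
-- def _add_compound_classes(label_list, postprocessing_dict):
--
--   '''This method is used to add compound classes to a label list if all the corresponding component labels are present.'''
--
--   outcome_list = label_list.copy()
--   for key in postprocessing_dict.keys():
--     condition = True
--     for value in postprocessing_dict[key]:
--       if value not in label_list:
--         condition = False
--     if condition:
--       outcome_list.append(key)
--   return outcome_list
-- ===== SOURCE B (Python) =====
-- def _add_compound_classes(label_list, postprocessing_dict):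
--
--   '''Inverted-index re-implementation: build, per component label, the list of compound
--   keys that require it, then make ONE pass over label_list discarding each seen label
--   from the remaining requirements of exactly the keys that need it; finally append the
--   keys (in dict order) whose remaining requirements are empty.'''
--
--   remaining = {key: list(values) for key, values in postprocessing_dict.items()}
--   index = {}
--   for key, values in postprocessing_dict.items():
--     for value in values:
--       index.setdefault(value, []).append(key)
--   for label in label_list:
--     for key in index.get(label, []):
--       remaining[key] = [v for v in remaining[key] if v != label]
--   return label_list + [key for key in postprocessing_dict if not remaining[key]]
-- ===== Notes on version B (the rewrite author's own statement) =====
-- stated objective: faster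
-- what changed: Replaces A's per-key rescan of label_list (a linear membership scan for every required value of every key) by an inverted index from each component label to the keys requiring it, plus per-key remaining-requirement lists consumed in a single label-driven pass; keys whose remaining requirements are empty are then appended in dict order.
import Mathlib
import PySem

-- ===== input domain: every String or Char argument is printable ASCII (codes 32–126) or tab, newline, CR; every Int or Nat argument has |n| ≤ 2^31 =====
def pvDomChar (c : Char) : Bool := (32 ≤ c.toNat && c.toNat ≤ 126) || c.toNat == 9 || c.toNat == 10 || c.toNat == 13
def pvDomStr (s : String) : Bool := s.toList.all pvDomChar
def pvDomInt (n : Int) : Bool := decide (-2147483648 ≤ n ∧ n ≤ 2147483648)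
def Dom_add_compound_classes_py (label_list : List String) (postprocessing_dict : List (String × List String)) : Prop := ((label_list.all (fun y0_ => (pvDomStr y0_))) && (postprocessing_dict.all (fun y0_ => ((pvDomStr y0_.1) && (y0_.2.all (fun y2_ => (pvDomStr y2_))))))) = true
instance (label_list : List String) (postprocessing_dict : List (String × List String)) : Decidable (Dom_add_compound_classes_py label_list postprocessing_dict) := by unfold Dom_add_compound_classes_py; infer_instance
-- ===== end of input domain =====

-- B replaces A's per-key rescan of label_list by an inverted index (component label → keys
-- needing it) driven by ONE pass over label_list; objective: alternative/faster data-structure.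

-- ===== PORT A =====
-- Python's dict parameter is modelled as its assoc list; entering the function we take the
-- dict it denotes (PySem.Dict.ofList). `postprocessing_dict[key]` with key drawn from
-- `.keys()` never raises, so `getD … []` is exact here.
def add_compound_classes_py (label_list : List String) (postprocessing_dict : List (String × List String)) : List String :=
  let d := PySem.Dict.ofList postprocessing_dict
  d.keys.foldl (fun outcome_list key =>
    let condition := (d.getD key []).foldl
      (fun condition value => if label_list.contains value = false then false else condition) true
    if condition then outcome_list ++ [key] else outcome_list) label_list

-- ===== PORT B =====
-- `index.setdefault(value, []).append(key)` = modify value [] (· ++ [key]);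
-- `remaining[key]` in the loop and in the final comprehension is always a present key
-- (remaining's keys are d's keys, index's values are d's keys), so `getD … []` is exact.
def add_compound_classes_py_alt (label_list : List String) (postprocessing_dict : List (String × List String)) : List String :=
  let d := PySem.Dict.ofList postprocessing_dict
  let remaining := d.items.foldl (fun r p => r.insert p.1 p.2)
    (PySem.Dict.empty : PySem.Dict String (List String))
  let index := d.items.foldl (fun ix p =>
      p.2.foldl (fun ix value => ix.modify value [] (fun ks => ks ++ [p.1])) ix)
    (PySem.Dict.empty : PySem.Dict String (List String))
  let remaining := label_list.foldl (fun r label =>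
      (index.getD label []).foldl (fun r key =>
        r.insert key ((r.getD key []).filter (fun v => v != label))) r) remaining
  label_list ++ d.keys.filter (fun key => (remaining.getD key []).isEmpty)

-- ===== PRECONDITION & SPEC =====
def Spec_add_compound_classes_py (label_list : List String) (postprocessing_dict : List (String × List String)) (out : List String) : Prop := out = add_compound_classes_py_alt label_list postprocessing_dict
instance (label_list : List String) (postprocessing_dict : List (String × List String)) (out : List String) : Decidable (Spec_add_compound_classes_py label_list postprocessing_dict out) := by unfold Spec_add_compound_classes_py; infer_instance

-- ===== CLAIM (what is proved, stated in full; the proofs are below) =====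
def Claim_equal_add_compound_classes_py : Prop := ∀ (label_list : List String) (postprocessing_dict : List (String × List String)), Dom_add_compound_classes_py label_list postprocessing_dict → Spec_add_compound_classes_py label_list postprocessing_dict (add_compound_classes_py label_list postprocessing_dict)

-- ===== LEMMAS AND PROOFS =====

-- the inverted index B builds, named for the proofs
def pvIndex (d : PySem.Dict String (List String)) : PySem.Dict String (List String) :=
  d.items.foldl (fun ix p =>
      p.2.foldl (fun ix value => ix.modify value [] (fun ks => ks ++ [p.1])) ix)
    PySem.Dict.empty

-- A's inner flag loop is `all`
theorem pv_flag_foldl (q : String → Bool) (l : List String) (b : Bool) :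
    l.foldl (fun condition value => if q value = false then false else condition) b
      = (b && l.all q) := by
  induction l generalizing b with
  | nil => simp
  | cons h t ih =>
    rw [List.foldl_cons]
    cases hq : q h
    · rw [if_pos rfl, ih, List.all_cons, hq]
      simp
    · rw [if_neg (by simp), ih, List.all_cons, hq]
      simp

-- characterisation of port A
theorem pv_A_char (label_list : List String) (postprocessing_dict : List (String × List String)) :
    add_compound_classes_py label_list postprocessing_dict
      = label_list ++ (PySem.Dict.ofList postprocessing_dict).keys.filter
          (fun k => ((PySem.Dict.ofList postprocessing_dict).getD k []).all
            (fun v => label_list.contains v)) := by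
  unfold add_compound_classes_py
  simp only [pv_flag_foldl, Bool.true_and]
  rw [show (fun (outcome_list : List String) key =>
        if ((PySem.Dict.ofList postprocessing_dict).getD key []).all
            (fun v => label_list.contains v) then outcome_list ++ [key] else outcome_list)
      = (fun acc x => if ((PySem.Dict.ofList postprocessing_dict).getD x []).all
            (fun v => label_list.contains v) then acc ++ [id x] else acc) from rfl,
    PySem.List.foldl_append_if]
  simp

-- membership in the inverted index
theorem pv_index_mem (d : PySem.Dict String (List String)) (label k : String) :
    k ∈ (pvIndex d).getD label [] ↔ ∃ p ∈ d.items, p.1 = k ∧ label ∈ p.2 := by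
  have hflat : pvIndex d
      = (d.items.flatMap (fun p => p.2.map (fun v => (v, p.1)))).foldl
          (fun ix q => ix.modify q.1 [] (fun ks => ks ++ [q.2])) PySem.Dict.empty := by
    unfold pvIndex
    rw [List.foldl_flatMap]
    simp only [List.foldl_map]
  rw [hflat, PySem.Dict.getD_foldl_modify_append]
  simp only [PySem.Dict.getD_empty, List.nil_append, List.mem_map, List.mem_filter,
    List.mem_flatMap]
  constructor
  · rintro ⟨q, ⟨⟨p, hp, ⟨v, hv, rfl⟩⟩, hlab⟩, rfl⟩
    have hv' : v = label := by simpa using hlab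
    subst hv'
    exact ⟨p, hp, rfl, hv⟩
  · rintro ⟨p, hp, hk, hlab⟩
    exact ⟨(label, p.1), ⟨⟨p, hp, ⟨label, hlab, rfl⟩⟩, by simp⟩, hk⟩

-- effect of the inner discard loop on one entry
theorem pv_discard_fold (ks : List String) (r : PySem.Dict String (List String))
    (lab k : String) :
    ((ks.foldl (fun r key => r.insert key ((r.getD key []).filter (fun v => v != lab))) r).getD k [])
      = if k ∈ ks then (r.getD k []).filter (fun v => v != lab) else r.getD k [] := by
  induction ks generalizing r with
  | nil => simp
  | cons h t ih =>
    simp only [List.foldl_cons, ih, PySem.Dict.getD_insert, List.mem_cons]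
    by_cases hk : k = h <;> by_cases ht : k ∈ t <;>
      simp [hk, ht, List.filter_filter]

-- effect of the whole label-driven pass: every entry loses exactly the seen labels
theorem pv_label_pass (d : PySem.Dict String (List String)) (hnd : d.keys.Nodup)
    (L : List String) (r : PySem.Dict String (List String))
    (hr : ∀ k, r.getD k [] ⊆ d.getD k []) (k : String) :
    ((L.foldl (fun r label =>
        ((pvIndex d).getD label []).foldl (fun r key =>
          r.insert key ((r.getD key []).filter (fun v => v != label))) r) r).getD k [])
      = (r.getD k []).filter (fun v => !(L.contains v)) := by
  induction L generalizing r with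
  | nil => simp
  | cons lab t ih =>
    simp only [List.foldl_cons]
    have hstep : ∀ k, ((((pvIndex d).getD lab []).foldl (fun r key =>
        r.insert key ((r.getD key []).filter (fun v => v != lab))) r).getD k [])
        = (r.getD k []).filter (fun v => v != lab) := by
      intro k
      rw [pv_discard_fold]
      split_ifs with hmem
      · rfl
      · refine ((List.filter_eq_self).mpr ?_).symm
        intro a ha
        by_contra hne
        have ha' : a = lab := by simpa using hne
        subst ha'
        have hd : a ∈ d.getD k [] := hr k ha
        have hc : d.contains k = true := by
          by_contra hc
          rw [PySem.Dict.getD_of_not_contains d [] (by simpa using hc)] at hd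
          simp at hd
        have hkk : k ∈ d.keys := by
          rw [PySem.Dict.contains_eq_decide_mem_keys] at hc
          simpa using hc
        exact hmem ((pv_index_mem d a k).mpr
          ⟨(k, d.getD k []), by
            rw [PySem.Dict.items_eq_map_keys d hnd []]
            exact List.mem_map.mpr ⟨k, hkk, rfl⟩, rfl, hd⟩)
    rw [ih _ (fun k => by rw [hstep k]; exact fun v hv => hr k (List.mem_of_mem_filter hv)),
      hstep k, List.filter_filter]
    apply List.filter_congr
    intro a _
    by_cases h1 : a = lab <;> simp [h1]

-- B's initial `remaining` dict comprehension rebuilds d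
theorem pv_remaining0 (d : PySem.Dict String (List String)) (hnd : d.keys.Nodup) :
    d.items.foldl (fun r p => r.insert p.1 p.2)
      (PySem.Dict.empty : PySem.Dict String (List String)) = d := by
  apply PySem.Dict.ext
  have h := PySem.Dict.items_foldl_insert_fresh d.items Prod.fst Prod.snd
    (PySem.Dict.empty : PySem.Dict String (List String))
    (fun a _ => PySem.Dict.contains_empty _) (by simpa [PySem.Dict.keys] using hnd)
  simpa using h

-- ===== VERDICT (by name: the statement is the Claim_ definition above) =====
theorem add_compound_classes_py_spec : Claim_equal_add_compound_classes_py := by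
  intro label_list postprocessing_dict _
  unfold Spec_add_compound_classes_py
  rw [pv_A_char]
  unfold add_compound_classes_py_alt
  simp only []
  set d := PySem.Dict.ofList postprocessing_dict with hd
  have hnd : d.keys.Nodup := PySem.Dict.nodup_keys_ofList postprocessing_dict
  rw [pv_remaining0 d hnd]
  congr 1
  apply List.filter_congr
  intro k _
  rw [show (d.items.foldl (fun ix p =>
        p.2.foldl (fun ix value => ix.modify value [] (fun ks => ks ++ [p.1])) ix)
      (PySem.Dict.empty : PySem.Dict String (List String))) = pvIndex d from rfl]
  rw [pv_label_pass d hnd label_list d (fun _ => List.Subset.refl _) k]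
  rw [Bool.eq_iff_iff]
  simp [List.isEmpty_iff, List.filter_eq_nil_iff, List.all_eq_true]
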